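-- pv_equiv track=rewrite | github.com/tgodzik/projects | blef/godzik.py | one_better
-- ===== SOURCE A (Python) =====
-- def one_better(value):
--     """
--     The next correct setting.
--     """
--     dice_list = [s for s in value]
--     for i in range(1, 6):
--         if dice_list.count(str(i)) > 0:
--             dice_list.append(str(i + 1))
--             dice_list.remove(str(i))
--             break
--     dice_list.sort()
--     return "".join(dice_list)
-- ===== SOURCE B (Python) =====
-- def one_better(value):
--     counts = {}
--     for c in value:
--         counts[c] = counts.get(c, 0) + 1
--     for d in "12345":
--         if counts.get(d, 0):
--             counts[d] = counts[d] - 1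
--             s = chr(ord(d) + 1)
--             counts[s] = counts.get(s, 0) + 1
--             break
--     return "".join(chr(i) * counts.get(chr(i), 0) for i in range(128))
-- ===== Notes on version B (the rewrite author's own statement) =====
-- stated objective: alternative
-- what changed: Replaces A's count/remove scans plus comparison sort by a counting sort: one pass builds a character-frequency dictionary, the bump moves one unit of count from the smallest digit 1-5 present to its successor, and the output is emitted by walking the 128 ASCII codes in order - no sort call at all.
import Mathlib
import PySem

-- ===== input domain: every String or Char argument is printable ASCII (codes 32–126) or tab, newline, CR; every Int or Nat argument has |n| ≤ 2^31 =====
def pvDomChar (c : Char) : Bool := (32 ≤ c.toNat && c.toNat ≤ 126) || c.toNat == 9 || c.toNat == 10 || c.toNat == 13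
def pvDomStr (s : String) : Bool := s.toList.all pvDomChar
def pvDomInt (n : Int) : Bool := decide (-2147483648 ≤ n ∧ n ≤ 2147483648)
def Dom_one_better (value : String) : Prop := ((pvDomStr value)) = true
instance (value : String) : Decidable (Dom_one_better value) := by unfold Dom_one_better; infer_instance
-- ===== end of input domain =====

-- B replaces A's per-digit count/remove scans and comparison sort by a counting sort:
-- a frequency dictionary built in one pass, a count bump for the smallest digit 1-5
-- present, and output emitted by walking the 128 ASCII codes in order (alternative).


-- ===== PORT A =====
-- the for-loop over range(1,6) with break; str(i) for 1 ≤ i ≤ 5 is the single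
-- digit character, ported as Char.ofNat (48 + i) (exact on these literals).
-- append-then-remove kept in order; list.remove is PySem.List.remove?
-- (the count > 0 guard guarantees it is some; .getD [] is never taken).
def oneBetterLoop (diceList : List Char) : List Nat → List Char
  | [] => diceList
  | i :: rest =>
    if 0 < PySem.List.count diceList (Char.ofNat (48 + i)) then
      (PySem.List.remove? (diceList ++ [Char.ofNat (48 + i + 1)]) (Char.ofNat (48 + i))).getD []
    else oneBetterLoop diceList rest

def one_better (value : String) : String :=
  let diceList := value.toList
  let diceList := oneBetterLoop diceList [1, 2, 3, 4, 5]
  String.ofList (PySem.List.sorted diceList (fun c => c))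

-- ===== PORT B =====
-- for d in "12345": if counts.get(d,0): decrement d, increment chr(ord(d)+1), break.
-- (int truthiness 'if counts.get(d, 0):' is '≠ 0'; chr(ord(d)+1) is Char.ofNat (d.toNat+1),
-- exact here since the codes involved are ≤ 54)
def bumpLoop (counts : PySem.Dict Char Int) : List Char → PySem.Dict Char Int
  | [] => counts
  | d :: rest =>
    if counts.getD d 0 ≠ 0 then
      (counts.insert d (counts.getD d 0 - 1)).insert (Char.ofNat (d.toNat + 1))
        ((counts.insert d (counts.getD d 0 - 1)).getD (Char.ofNat (d.toNat + 1)) 0 + 1)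
    else bumpLoop counts rest

-- counts = one-pass frequency dict; output = ''.join(chr(i) * counts.get(chr(i), 0) for i in range(128)).
-- chr(i) * k is PySem.List.pyRepeat on the one-character list (exact: codes 0..127 are valid chars).
def one_better_alt (value : String) : String :=
  String.ofList ((PySem.List.pyRange 0 128 1).foldl
    (fun acc i => acc ++ PySem.List.pyRepeat [Char.ofNat i.toNat]
      ((bumpLoop (value.toList.foldl (fun d c => d.insert c (d.getD c 0 + 1))
          (PySem.Dict.empty : PySem.Dict Char Int)) ['1', '2', '3', '4', '5']).getD (Char.ofNat i.toNat) 0)) [])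

-- ===== PRECONDITION & SPEC =====
def Spec_one_better (value : String) (out : String) : Prop := out = one_better_alt value
instance (value : String) (out : String) : Decidable (Spec_one_better value out) := by unfold Spec_one_better; infer_instance

-- ===== CLAIM (what is proved, stated in full; the proofs are below) =====
def Claim_equal_one_better : Prop := ∀ (value : String), Dom_one_better value → Spec_one_better value (one_better value)

-- ===== LEMMAS AND PROOFS =====
theorem toNat_ofNat_small (n : Nat) (h : n < 128) : (Char.ofNat n).toNat = n := by
  have hv : n.isValidChar := Or.inl (by omega)
  rw [Char.ofNat, dif_pos hv]
  simp [Char.ofNatAux, Char.toNat]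

theorem char_le_of_toNat_le (a b : Char) (h : a.toNat ≤ b.toNat) : a ≤ b := by
  simpa [Char.le_def, UInt32.le_iff_toNat_le] using h

-- count of c in the counting-sort output over codes < n
theorem flat_count (g : Nat → Nat) (c : Char) :
    ∀ n, n ≤ 128 →
      ((List.range n).flatMap (fun i => List.replicate (g i) (Char.ofNat i))).count c
        = if c.toNat < n then g c.toNat else 0
  | 0, _ => by simp
  | n + 1, h => by
    rw [List.range_succ, List.flatMap_append, List.count_append, flat_count g c n (by omega)]
    simp only [List.flatMap_cons, List.flatMap_nil, List.append_nil, List.count_replicate,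
      beq_iff_eq]
    by_cases hc : Char.ofNat n = c
    · have hn : c.toNat = n := by rw [← hc, toNat_ofNat_small n (by omega)]
      rw [if_pos hc, hn, if_neg (lt_irrefl n), if_pos (by omega), Nat.zero_add]
    · have hn : c.toNat ≠ n := fun he => hc (by rw [← he, Char.ofNat_toNat])
      rw [if_neg hc]
      by_cases hlt : c.toNat < n
      · rw [if_pos hlt, if_pos (by omega), Nat.add_zero]
      · rw [if_neg hlt, if_neg (by omega), Nat.add_zero]

theorem mem_flat (g : Nat → Nat) (n : Nat) (hn : n ≤ 128) (c : Char)
    (hc : c ∈ (List.range n).flatMap (fun i => List.replicate (g i) (Char.ofNat i))) :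
    c.toNat < n := by
  rcases List.mem_flatMap.mp hc with ⟨i, hi, hci⟩
  have hi' := List.mem_range.mp hi
  rw [List.eq_of_mem_replicate hci, toNat_ofNat_small i (by omega)]
  exact hi'

theorem pairwise_flat (g : Nat → Nat) :
    ∀ n, n ≤ 128 →
      ((List.range n).flatMap (fun i => List.replicate (g i) (Char.ofNat i))).Pairwise (· ≤ ·)
  | 0, _ => by simp
  | n + 1, h => by
    rw [List.range_succ, List.flatMap_append]
    refine List.pairwise_append.mpr ⟨pairwise_flat g n (by omega), ?_, ?_⟩
    · simp only [List.flatMap_cons, List.flatMap_nil, List.append_nil]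
      exact (List.pairwise_replicate).mpr (Or.inr (le_refl _))
    · intro a ha b hb
      simp only [List.flatMap_cons, List.flatMap_nil, List.append_nil] at hb
      have hbn : b = Char.ofNat n := List.eq_of_mem_replicate hb
      have han : a.toNat < n := mem_flat g n (by omega) a ha
      refine char_le_of_toNat_le a b ?_
      rw [hbn, toNat_ofNat_small n (by omega)]
      omega

-- pointwise rewrite of the emission function under the dict hypothesis
theorem map_flatMap_emit (D : PySem.Dict Char Int) (M : List Char)
    (hD : ∀ c : Char, D.getD c 0 = (M.count c : Int)) :
    ∀ n : Nat, ((List.range n).map (fun (i : Nat) => (i : Int))).flatMap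
        (fun i => PySem.List.pyRepeat [Char.ofNat i.toNat] (D.getD (Char.ofNat i.toNat) 0))
      = (List.range n).flatMap (fun i => List.replicate (M.count (Char.ofNat i)) (Char.ofNat i))
  | 0 => rfl
  | n + 1 => by
    rw [List.range_succ, List.map_append, List.flatMap_append, List.flatMap_append,
      map_flatMap_emit D M hD n]
    simp only [List.map_cons, List.map_nil, List.flatMap_cons, List.flatMap_nil, List.append_nil]
    rw [Int.toNat_natCast, hD, PySem.List.pyRepeat_singleton, Int.toNat_natCast]

-- the counting-sort emission over codes 0..127 of any dict holding M's multiplicities is sorted(M)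
theorem csort_eq (M : List Char) (hM : ∀ c ∈ M, c.toNat < 128) (D : PySem.Dict Char Int)
    (hD : ∀ c : Char, D.getD c 0 = (M.count c : Int)) :
    (PySem.List.pyRange 0 128 1).foldl
        (fun acc i => acc ++ PySem.List.pyRepeat [Char.ofNat i.toNat] (D.getD (Char.ofNat i.toNat) 0)) []
      = PySem.List.sorted M (fun c => c) := by
  rw [PySem.List.foldl_append_eq_flatMap, List.nil_append]
  have hrange : PySem.List.pyRange 0 128 1 = (List.range 128).map (fun (i : Nat) => (i : Int)) := by rfl
  rw [hrange, map_flatMap_emit D M hD 128]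
  have hperm : ((List.range 128).flatMap
      (fun i => List.replicate (M.count (Char.ofNat i)) (Char.ofNat i))).Perm M := by
    refine List.perm_iff_count.mpr ?_
    intro c
    rw [flat_count _ c 128 (le_refl _)]
    by_cases hc : c.toNat < 128
    · rw [if_pos hc, Char.ofNat_toNat]
    · rw [if_neg hc, eq_comm, List.count_eq_zero]
      exact fun hm => hc (hM c hm)
  exact (PySem.List.sorted_id_eq_of_perm_of_pairwise _ _ hperm (pairwise_flat _ 128 (le_refl _))).symm

theorem count_pos_iff_mem (L : List Char) (c : Char) :
    (0 < PySem.List.count L c) ↔ c ∈ L := by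
  rw [PySem.List.count_eq]; exact List.count_pos_iff

theorem build_getD (L : List Char) (c : Char) :
    (L.foldl (fun d x => d.insert x (d.getD x 0 + 1)) (PySem.Dict.empty : PySem.Dict Char Int)).getD c 0
      = (L.count c : Int) := by
  rw [PySem.Dict.getD_foldl_insert_add_one]
  simp [PySem.Dict.getD_empty]

-- after the bump, the dict holds exactly the multiplicities of A's modified list (L ++ [s]).erase d
theorem bumped_getD (L : List Char) (d s : Char) (hd : d ∈ L) (hne : s ≠ d) (c : Char) :
    (((L.foldl (fun dd x => dd.insert x (dd.getD x 0 + 1)) (PySem.Dict.empty : PySem.Dict Char Int)).insert d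
        ((L.foldl (fun dd x => dd.insert x (dd.getD x 0 + 1)) (PySem.Dict.empty : PySem.Dict Char Int)).getD d 0 - 1)).insert s
        (((L.foldl (fun dd x => dd.insert x (dd.getD x 0 + 1)) (PySem.Dict.empty : PySem.Dict Char Int)).insert d
          ((L.foldl (fun dd x => dd.insert x (dd.getD x 0 + 1)) (PySem.Dict.empty : PySem.Dict Char Int)).getD d 0 - 1)).getD s 0 + 1)).getD c 0
      = ((((L ++ [s]).erase d).count c : Nat) : Int) := by
  by_cases hcs : c = s
  · subst hcs
    have hcd : c ≠ d := hne
    have hdc : (d == c) = false := beq_eq_false_iff_ne.mpr (fun he => hcd he.symm)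
    have hR : ((L ++ [c]).erase d).count c = L.count c + 1 := by
      rw [List.count_erase, hdc]
      simp [List.count_append]
    rw [hR, PySem.Dict.getD_insert, if_pos rfl, PySem.Dict.getD_insert, if_neg hcd, build_getD]
    push_cast
    ring
  · by_cases hcd : c = d
    · subst hcd
      have h1 : 1 ≤ L.count c := List.count_pos_iff.mpr hd
      have hsc' : (s == c) = false := beq_eq_false_iff_ne.mpr (fun he => hcs he.symm)
      have hcc : (c == c) = true := beq_iff_eq.mpr rfl
      have hR : ((L ++ [s]).erase c).count c = L.count c - 1 := by
        rw [List.count_erase, hcc]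
        simp [List.count_append, List.count_cons, hsc']
      rw [hR, PySem.Dict.getD_insert, if_neg hcs, PySem.Dict.getD_insert, if_pos rfl, build_getD]
      omega
    · have hsc' : (s == c) = false := beq_eq_false_iff_ne.mpr (fun he => hcs he.symm)
      have hdc : (d == c) = false := beq_eq_false_iff_ne.mpr (fun he => hcd he.symm)
      have hR : ((L ++ [s]).erase d).count c = L.count c := by
        rw [List.count_erase, hdc]
        simp [List.count_append, List.count_cons, hsc']
      rw [hR, PySem.Dict.getD_insert, if_neg hcs, PySem.Dict.getD_insert, if_neg hcd, build_getD]

-- A's found branch vs B's bumped counting sort, for a digit d with successor s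
theorem branch_eq (L : List Char) (hL : ∀ c ∈ L, c.toNat < 128) (d s : Char)
    (hd : d ∈ L) (hne : s ≠ d) (hs : s.toNat < 128) :
    String.ofList (PySem.List.sorted ((PySem.List.remove? (L ++ [s]) d).getD []) (fun c => c))
      = String.ofList ((PySem.List.pyRange 0 128 1).foldl
          (fun acc i => acc ++ PySem.List.pyRepeat [Char.ofNat i.toNat]
            ((((L.foldl (fun dd x => dd.insert x (dd.getD x 0 + 1)) (PySem.Dict.empty : PySem.Dict Char Int)).insert d
                ((L.foldl (fun dd x => dd.insert x (dd.getD x 0 + 1)) (PySem.Dict.empty : PySem.Dict Char Int)).getD d 0 - 1)).insert s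
                (((L.foldl (fun dd x => dd.insert x (dd.getD x 0 + 1)) (PySem.Dict.empty : PySem.Dict Char Int)).insert d
                  ((L.foldl (fun dd x => dd.insert x (dd.getD x 0 + 1)) (PySem.Dict.empty : PySem.Dict Char Int)).getD d 0 - 1)).getD s 0 + 1)).getD (Char.ofNat i.toNat) 0)) []) := by
  rw [PySem.List.remove?_eq_some_erase (L ++ [s]) d (List.mem_append_left _ hd), Option.getD_some]
  refine congrArg String.ofList ?_
  refine (csort_eq ((L ++ [s]).erase d) ?_ _ (bumped_getD L d s hd hne)).symm
  intro c hc
  rcases List.mem_append.mp (List.mem_of_mem_erase hc) with h | h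
  · exact hL c h
  · rw [List.mem_singleton.mp h]; exact hs

theorem count_ne_zero_iff_mem (L : List Char) (c : Char) :
    ((L.count c : Int) ≠ 0) ↔ c ∈ L := by
  rw [Int.natCast_ne_zero]
  constructor
  · intro h; exact List.count_pos_iff.mp (Nat.pos_of_ne_zero h)
  · intro h
    have := List.count_pos_iff.mpr h
    omega

theorem main_eq (value : String) (hDom : Dom_one_better value) :
    one_better value = one_better_alt value := by
  unfold one_better one_better_alt
  unfold Dom_one_better pvDomStr at hDom
  set L := value.toList with hLdef
  have hL : ∀ c ∈ L, c.toNat < 128 := by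
    intro c hc
    have h := List.all_eq_true.mp hDom c hc
    simp only [pvDomChar, Bool.or_eq_true, Bool.and_eq_true, decide_eq_true_eq, beq_iff_eq] at h
    omega
  have hC := build_getD L
  by_cases h1 : ('1' : Char) ∈ L
  · simp only [oneBetterLoop, bumpLoop]
    rw [show Char.ofNat (48 + 1) = '1' from rfl,
      if_pos ((count_pos_iff_mem L '1').mpr h1),
      if_pos (show ((L.foldl (fun d c => d.insert c (d.getD c 0 + 1)) (PySem.Dict.empty : PySem.Dict Char Int)).getD '1' 0 ≠ 0) from by rw [hC '1']; exact (count_ne_zero_iff_mem L '1').mpr h1)]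
    rw [show Char.ofNat (48 + 1 + 1) = '2' from rfl, show Char.ofNat (('1' : Char).toNat + 1) = '2' from rfl]; exact branch_eq L hL '1' '2' h1 (by decide) (by decide)
  · have c1 : PySem.List.count L '1' = 0 := by
      rw [PySem.List.count_eq]; exact List.count_eq_zero.mpr h1
    have g1 : ¬((L.foldl (fun d c => d.insert c (d.getD c 0 + 1)) (PySem.Dict.empty : PySem.Dict Char Int)).getD '1' 0 ≠ 0) := by
      rw [hC '1']; simpa using (List.count_eq_zero.mpr h1)
    by_cases h2 : ('2' : Char) ∈ L
    · simp only [oneBetterLoop, bumpLoop]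
      rw [show Char.ofNat (48 + 1) = '1' from rfl, show Char.ofNat (48 + 2) = '2' from rfl,
        if_neg (by simpa using h1), if_pos ((count_pos_iff_mem L '2').mpr h2),
        if_neg g1, if_pos (show ((L.foldl (fun d c => d.insert c (d.getD c 0 + 1)) (PySem.Dict.empty : PySem.Dict Char Int)).getD '2' 0 ≠ 0) from by rw [hC '2']; exact (count_ne_zero_iff_mem L '2').mpr h2)]
      rw [show Char.ofNat (48 + 2 + 1) = '3' from rfl, show Char.ofNat (('2' : Char).toNat + 1) = '3' from rfl]; exact branch_eq L hL '2' '3' h2 (by decide) (by decide)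
    · have c2 : PySem.List.count L '2' = 0 := by
        rw [PySem.List.count_eq]; exact List.count_eq_zero.mpr h2
      have g2 : ¬((L.foldl (fun d c => d.insert c (d.getD c 0 + 1)) (PySem.Dict.empty : PySem.Dict Char Int)).getD '2' 0 ≠ 0) := by
        rw [hC '2']; simpa using (List.count_eq_zero.mpr h2)
      by_cases h3 : ('3' : Char) ∈ L
      · simp only [oneBetterLoop, bumpLoop]
        rw [show Char.ofNat (48 + 1) = '1' from rfl, show Char.ofNat (48 + 2) = '2' from rfl,
          show Char.ofNat (48 + 3) = '3' from rfl,
          if_neg (by simpa using h1), if_neg (by simpa using h2),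
          if_pos ((count_pos_iff_mem L '3').mpr h3),
          if_neg g1, if_neg g2, if_pos (show ((L.foldl (fun d c => d.insert c (d.getD c 0 + 1)) (PySem.Dict.empty : PySem.Dict Char Int)).getD '3' 0 ≠ 0) from by rw [hC '3']; exact (count_ne_zero_iff_mem L '3').mpr h3)]
        rw [show Char.ofNat (48 + 3 + 1) = '4' from rfl, show Char.ofNat (('3' : Char).toNat + 1) = '4' from rfl]; exact branch_eq L hL '3' '4' h3 (by decide) (by decide)
      · have c3 : PySem.List.count L '3' = 0 := by
          rw [PySem.List.count_eq]; exact List.count_eq_zero.mpr h3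
        have g3 : ¬((L.foldl (fun d c => d.insert c (d.getD c 0 + 1)) (PySem.Dict.empty : PySem.Dict Char Int)).getD '3' 0 ≠ 0) := by
          rw [hC '3']; simpa using (List.count_eq_zero.mpr h3)
        by_cases h4 : ('4' : Char) ∈ L
        · simp only [oneBetterLoop, bumpLoop]
          rw [show Char.ofNat (48 + 1) = '1' from rfl, show Char.ofNat (48 + 2) = '2' from rfl,
            show Char.ofNat (48 + 3) = '3' from rfl, show Char.ofNat (48 + 4) = '4' from rfl,
            if_neg (by simpa using h1), if_neg (by simpa using h2), if_neg (by simpa using h3),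
            if_pos ((count_pos_iff_mem L '4').mpr h4),
            if_neg g1, if_neg g2, if_neg g3, if_pos (show ((L.foldl (fun d c => d.insert c (d.getD c 0 + 1)) (PySem.Dict.empty : PySem.Dict Char Int)).getD '4' 0 ≠ 0) from by rw [hC '4']; exact (count_ne_zero_iff_mem L '4').mpr h4)]
          rw [show Char.ofNat (48 + 4 + 1) = '5' from rfl, show Char.ofNat (('4' : Char).toNat + 1) = '5' from rfl]; exact branch_eq L hL '4' '5' h4 (by decide) (by decide)
        · have c4 : PySem.List.count L '4' = 0 := by
            rw [PySem.List.count_eq]; exact List.count_eq_zero.mpr h4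
          have g4 : ¬((L.foldl (fun d c => d.insert c (d.getD c 0 + 1)) (PySem.Dict.empty : PySem.Dict Char Int)).getD '4' 0 ≠ 0) := by
            rw [hC '4']; simpa using (List.count_eq_zero.mpr h4)
          by_cases h5 : ('5' : Char) ∈ L
          · simp only [oneBetterLoop, bumpLoop]
            rw [show Char.ofNat (48 + 1) = '1' from rfl, show Char.ofNat (48 + 2) = '2' from rfl,
              show Char.ofNat (48 + 3) = '3' from rfl, show Char.ofNat (48 + 4) = '4' from rfl,
              show Char.ofNat (48 + 5) = '5' from rfl,
              if_neg (by simpa using h1), if_neg (by simpa using h2), if_neg (by simpa using h3), if_neg (by simpa using h4),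
              if_pos ((count_pos_iff_mem L '5').mpr h5),
              if_neg g1, if_neg g2, if_neg g3, if_neg g4, if_pos (show ((L.foldl (fun d c => d.insert c (d.getD c 0 + 1)) (PySem.Dict.empty : PySem.Dict Char Int)).getD '5' 0 ≠ 0) from by rw [hC '5']; exact (count_ne_zero_iff_mem L '5').mpr h5)]
            rw [show Char.ofNat (48 + 5 + 1) = '6' from rfl, show Char.ofNat (('5' : Char).toNat + 1) = '6' from rfl]; exact branch_eq L hL '5' '6' h5 (by decide) (by decide)
          · have c5 : PySem.List.count L '5' = 0 := by
              rw [PySem.List.count_eq]; exact List.count_eq_zero.mpr h5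
            have g5 : ¬((L.foldl (fun d c => d.insert c (d.getD c 0 + 1)) (PySem.Dict.empty : PySem.Dict Char Int)).getD '5' 0 ≠ 0) := by
              rw [hC '5']; simpa using (List.count_eq_zero.mpr h5)
            simp only [oneBetterLoop, bumpLoop]
            rw [show Char.ofNat (48 + 1) = '1' from rfl, show Char.ofNat (48 + 2) = '2' from rfl,
              show Char.ofNat (48 + 3) = '3' from rfl, show Char.ofNat (48 + 4) = '4' from rfl,
              show Char.ofNat (48 + 5) = '5' from rfl,
              if_neg (by simpa using h1), if_neg (by simpa using h2), if_neg (by simpa using h3), if_neg (by simpa using h4),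
              if_neg (by simpa using h5),
              if_neg g1, if_neg g2, if_neg g3, if_neg g4, if_neg g5]
            exact (congrArg String.ofList (csort_eq L hL _ hC)).symm

-- ===== VERDICT (by name: the statement is the Claim_ definition above) =====
theorem one_better_spec : Claim_equal_one_better := fun value h => main_eq value h
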